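-- pv_equiv track=rewrite | github.com/LaurenzPoll/Web-Inspector | src/header_analysis.py | check_header_order
-- ===== SOURCE A (Python) =====
-- def check_header_order(headers):
--     """
--     Analyze the sequence and content of HTML headers for semantic correctness and accessibility,
--     following best practices (MDN, WCAG).
--
--     - First heading must be <h1>.
--     - Only one <h1> ideally.
--     - No skipping heading levels upward.
--     - No empty headings.
--     - No <hN> before its immediate parent <h(N-1)>.
--     """
--     tips = []
--     seen = set()
--
--     def add_tip(msg):
--         if msg not in seen:
--             tips.append(msg)
--             seen.add(msg)
--
--     # Normalize and extract
--     header_tags  = [tag.upper() for tag, _ in headers]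
--     header_texts = [text       for _, text in headers]
--     header_levels = []
--     for tag in header_tags:
--         if len(tag) == 2 and tag[0] == "H" and tag[1].isdigit():
--             header_levels.append(int(tag[1]))
--
--     # 1. First heading must be <h1>
--     if header_levels:
--         if header_levels[0] != 1:
--             add_tip("[SHOULD] The first heading should be <h1> (MDN, WCAG).")
--     else:
--         # No headings at all
--         add_tip("[MUST] At least one <h1> should be present (MDN, WCAG).")
--
--     # 2. Ideally only one <h1>
--     h1_count = header_tags.count("H1")
--     if h1_count > 1:
--         add_tip(f"[COULD] Ideally, only one <h1> per page; found {h1_count} (MDN, WCAG).")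
--
--     # 3. Do not skip heading levels upward
--     skips = set()
--     for prev, curr in zip(header_levels, header_levels[1:]):
--         if curr - prev > 1:
--             skips.add(f"<h{curr}> after <h{prev}>")
--     if skips:
--         add_tip(f"[SHOULD] Do not skip heading levels upward: {', '.join(sorted(skips))} (MDN, WCAG).")
--
--     # 4. Avoid empty headings
--     empty = {f"<{tag}>" for tag, text in zip(header_tags, header_texts) if not text.strip()}
--     if empty:
--         add_tip(f"[MUST] Avoid empty headings: {', '.join(sorted(empty))} (MDN, WCAG).")
--
--     # 5. Direct-parent hierarchy: <hN> should not precede any <h(N-1)>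
--     first_seen = {}
--     for idx, lvl in enumerate(header_levels):
--         first_seen.setdefault(lvl, idx)
--     for lvl in range(2, 7):
--         if lvl in first_seen and (lvl - 1) in first_seen:
--             if first_seen[lvl] < first_seen[lvl - 1]:
--                 add_tip(
--                     f"[COULD] <h{lvl}> appears before its parent <h{lvl-1}>; review outline hierarchy (MDN)."
--                 )
--
--     return tips
-- ===== SOURCE B (Python) =====
-- def _level(tag):
--     if len(tag) == 2 and tag[0] == "H" and tag[1].isdigit():
--         return int(tag[1])
--     return None
--
--
-- def check_header_order(headers):
--     # Single pass over the headers, tracking everything at once.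
--     first_level = None
--     h1_count = 0
--     skips = set()
--     empty = set()
--     prev = None
--     first_seen = {}
--     n_levels = 0
--     for tag, text in headers:
--         tag = tag.upper()
--         if not text.strip():
--             empty.add(f"<{tag}>")
--         lvl = _level(tag)
--         if lvl is not None:
--             if tag == "H1":
--                 h1_count += 1
--             if first_level is None:
--                 first_level = lvl
--             if prev is not None and lvl - prev > 1:
--                 skips.add(f"<h{lvl}> after <h{prev}>")
--             prev = lvl
--             first_seen.setdefault(lvl, n_levels)
--             n_levels += 1
--
--     tips = []
--     if first_level is None:
--         tips.append("[MUST] At least one <h1> should be present (MDN, WCAG).")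
--     elif first_level != 1:
--         tips.append("[SHOULD] The first heading should be <h1> (MDN, WCAG).")
--     if h1_count > 1:
--         tips.append(f"[COULD] Ideally, only one <h1> per page; found {h1_count} (MDN, WCAG).")
--     if skips:
--         tips.append(f"[SHOULD] Do not skip heading levels upward: {', '.join(sorted(skips))} (MDN, WCAG).")
--     if empty:
--         tips.append(f"[MUST] Avoid empty headings: {', '.join(sorted(empty))} (MDN, WCAG).")
--     for lvl in range(2, 7):
--         if lvl in first_seen and (lvl - 1) in first_seen and first_seen[lvl] < first_seen[lvl - 1]:
--             tips.append(f"[COULD] <h{lvl}> appears before its parent <h{lvl-1}>; review outline hierarchy (MDN).")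
--     return tips
-- ===== Notes on version B (the rewrite author's own statement) =====
-- stated objective: alternative
-- what changed: A makes five separate passes over the headers (tag-upper map, level extraction, adjacent-pair scan, empty-text scan, enumerate/setdefault pass) plus an add_tip dedup set; B fuses everything into one single loop over the headers that simultaneously tracks first level, h1 count, skip set, empty set, previous level and first-seen indices, then emits the tips directly (the messages are provably pairwise distinct, so no dedup set is needed).
import Mathlib
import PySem

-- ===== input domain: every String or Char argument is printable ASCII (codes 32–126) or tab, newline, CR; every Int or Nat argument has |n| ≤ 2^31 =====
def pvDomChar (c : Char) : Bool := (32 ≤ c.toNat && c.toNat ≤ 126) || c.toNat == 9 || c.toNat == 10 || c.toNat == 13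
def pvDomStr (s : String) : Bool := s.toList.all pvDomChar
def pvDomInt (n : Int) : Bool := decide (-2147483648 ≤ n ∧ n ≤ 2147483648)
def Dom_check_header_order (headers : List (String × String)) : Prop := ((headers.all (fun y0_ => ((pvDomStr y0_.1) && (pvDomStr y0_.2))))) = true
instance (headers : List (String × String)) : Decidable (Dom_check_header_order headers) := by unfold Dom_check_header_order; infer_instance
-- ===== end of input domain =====

-- B re-implements A's five separate passes over the headers as one single fused loop that
-- tracks all facts at once (objective: alternative single-pass decomposition; same output).

-- ----- shared message builders and the heading-level parser (both Pythons contain these strings / this test verbatim) -----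
def msg_nohead : String := "[MUST] At least one <h1> should be present (MDN, WCAG)."
def msg_first : String := "[SHOULD] The first heading should be <h1> (MDN, WCAG)."
def msg_h1 (n : Int) : String := "[COULD] Ideally, only one <h1> per page; found " ++ PySem.Int.toStr n ++ " (MDN, WCAG)."
def msg_skips (s : String) : String := "[SHOULD] Do not skip heading levels upward: " ++ s ++ " (MDN, WCAG)."
def msg_empty (s : String) : String := "[MUST] Avoid empty headings: " ++ s ++ " (MDN, WCAG)."
def msg_parent (l : Int) : String := "[COULD] <h" ++ PySem.Int.toStr l ++ "> appears before its parent <h" ++ PySem.Int.toStr (l - 1) ++ ">; review outline hierarchy (MDN)."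
def msg_pair (prev curr : Int) : String := "<h" ++ PySem.Int.toStr curr ++ "> after <h" ++ PySem.Int.toStr prev ++ ">"

-- 'len(tag) == 2 and tag[0] == "H" and tag[1].isdigit()' then 'int(tag[1])'; none = condition false
-- (the int() never raises under the isdigit guard)
def pvLvl? (tag : String) : Option Int :=
  if PySem.Str.len tag == 2 then
    match PySem.Str.pyGet? tag 0, PySem.Str.pyGet? tag 1 with
    | some c0, some c1 =>
        if c0 == 'H' && PySem.Chars.isdigit c1 then PySem.Int.ofChars? [c1] else none
    | _, _ => none
  else none

-- ===== PORT A =====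
-- add_tip with its dedup 'seen' set (tips list, seen set)
def pvAddTip (st : List String × PySem.Set String) (msg : String) : List String × PySem.Set String :=
  if PySem.Set.contains st.2 msg then st else (st.1 ++ [msg], PySem.Set.add st.2 msg)

def check_header_order (headers : List (String × String)) : List String :=
  let header_tags := headers.map (fun p => PySem.Str.upper p.1)
  let header_texts := headers.map (fun p => p.2)
  let header_levels := header_tags.foldl (fun acc tag =>
      match pvLvl? tag with | some n => acc ++ [n] | none => acc) []
  let st0 : List String × PySem.Set String := ([], PySem.Set.empty)
  -- 1. first heading must be <h1>
  let st1 := match header_levels with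
    | [] => pvAddTip st0 msg_nohead
    | l :: _ => if l ≠ 1 then pvAddTip st0 msg_first else st0
  -- 2. ideally only one <h1>
  let h1_count : Int := (PySem.List.count header_tags "H1" : Int)
  let st2 := if h1_count > 1 then pvAddTip st1 (msg_h1 h1_count) else st1
  -- 3. no skipped levels upward (zip(levels, levels[1:]))
  let skips := (header_levels.zip (header_levels.drop 1)).foldl
      (fun s pc => if pc.2 - pc.1 > 1 then PySem.Set.add s (msg_pair pc.1 pc.2) else s) PySem.Set.empty
  let st3 := if skips ≠ [] then
      pvAddTip st2 (msg_skips (PySem.Str.join ", " (PySem.List.sorted skips (fun x => x) false))) else st2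
  -- 4. no empty headings (zip(tags, texts))
  let empt := (header_tags.zip header_texts).foldl
      (fun s tt => if PySem.Str.strip tt.2 == "" then PySem.Set.add s ("<" ++ tt.1 ++ ">") else s) PySem.Set.empty
  let st4 := if empt ≠ [] then
      pvAddTip st3 (msg_empty (PySem.Str.join ", " (PySem.List.sorted empt (fun x => x) false))) else st3
  -- 5. direct-parent hierarchy via first_seen (enumerate = fold with an index counter)
  let first_seen := (header_levels.foldl
      (fun (p : PySem.Dict Int Int × Int) l => (PySem.Dict.setdefault p.1 l p.2, p.2 + 1))
      (PySem.Dict.empty, 0)).1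
  let st5 := (PySem.List.pyRange 2 7 1).foldl (fun st lvl =>
      if PySem.Dict.contains first_seen lvl && PySem.Dict.contains first_seen (lvl - 1) then
        -- both keys present, so getD is the exact dict lookup
        if PySem.Dict.getD first_seen lvl 0 < PySem.Dict.getD first_seen (lvl - 1) 0 then
          pvAddTip st (msg_parent lvl)
        else st
      else st) st4
  st5.1

-- ===== PORT B =====
-- single-pass state: everything B's one loop tracks
structure PVSt where
  firstLevel : Option Int
  h1 : Int
  skips : PySem.Set String
  empties : PySem.Set String
  prev : Option Int
  firstSeen : PySem.Dict Int Int
  nLevels : Int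

def pvInit : PVSt := ⟨none, 0, PySem.Set.empty, PySem.Set.empty, none, PySem.Dict.empty, 0⟩

def pvStep (s : PVSt) (h : String × String) : PVSt :=
  let tag := PySem.Str.upper h.1
  let s := if PySem.Str.strip h.2 == "" then
      { s with empties := PySem.Set.add s.empties ("<" ++ tag ++ ">") } else s
  match pvLvl? tag with
  | none => s
  | some lvl =>
    { s with
      h1 := if tag == "H1" then s.h1 + 1 else s.h1,
      firstLevel := match s.firstLevel with | none => some lvl | some f => some f,
      skips := match s.prev with
        | some p => if lvl - p > 1 then PySem.Set.add s.skips (msg_pair p lvl) else s.skips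
        | none => s.skips,
      prev := some lvl,
      firstSeen := PySem.Dict.setdefault s.firstSeen lvl s.nLevels,
      nLevels := s.nLevels + 1 }

def check_header_order_alt (headers : List (String × String)) : List String :=
  let s := headers.foldl pvStep pvInit
  let tips : List String := []
  let tips := match s.firstLevel with
    | none => tips ++ [msg_nohead]
    | some f => if f ≠ 1 then tips ++ [msg_first] else tips
  let tips := if s.h1 > 1 then tips ++ [msg_h1 s.h1] else tips
  let tips := if s.skips ≠ [] then
      tips ++ [msg_skips (PySem.Str.join ", " (PySem.List.sorted s.skips (fun x => x) false))] else tips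
  let tips := if s.empties ≠ [] then
      tips ++ [msg_empty (PySem.Str.join ", " (PySem.List.sorted s.empties (fun x => x) false))] else tips
  (PySem.List.pyRange 2 7 1).foldl (fun tips lvl =>
      if PySem.Dict.contains s.firstSeen lvl && PySem.Dict.contains s.firstSeen (lvl - 1)
          && decide (PySem.Dict.getD s.firstSeen lvl 0 < PySem.Dict.getD s.firstSeen (lvl - 1) 0) then
        tips ++ [msg_parent lvl]
      else tips) tips

-- ===== PRECONDITION & SPEC =====
def Spec_check_header_order (headers : List (String × String)) (out : List String) : Prop := out = check_header_order_alt headers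
instance (headers : List (String × String)) (out : List String) : Decidable (Spec_check_header_order headers out) := by unfold Spec_check_header_order; infer_instance

-- ===== CLAIM (what is proved, stated in full; the proofs are below) =====
def Claim_equal_check_header_order : Prop := ∀ (headers : List (String × String)), Dom_check_header_order headers → Spec_check_header_order headers (check_header_order headers)

-- ===== LEMMAS AND PROOFS =====

-- A-side quantities, named (exactly the expressions A's port builds)
def pvTags (hs : List (String × String)) : List String := hs.map (fun p => PySem.Str.upper p.1)

def pvLevels (hs : List (String × String)) : List Int :=
  (hs.map (fun p => PySem.Str.upper p.1)).filterMap pvLvl?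

def pvSkipsOf (L : List Int) : PySem.Set String :=
  (L.zip (L.drop 1)).foldl
    (fun s pc => if pc.2 - pc.1 > 1 then PySem.Set.add s (msg_pair pc.1 pc.2) else s) PySem.Set.empty

def pvEmptiesOf (hs : List (String × String)) : PySem.Set String :=
  ((pvTags hs).zip (hs.map (fun p => p.2))).foldl
    (fun s tt => if PySem.Str.strip tt.2 == "" then PySem.Set.add s ("<" ++ tt.1 ++ ">") else s) PySem.Set.empty

def pvFS (L : List Int) : PySem.Dict Int Int × Int :=
  L.foldl (fun (p : PySem.Dict Int Int × Int) l => (PySem.Dict.setdefault p.1 l p.2, p.2 + 1))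
    (PySem.Dict.empty, 0)

def pvStA (hs : List (String × String)) : PVSt :=
  ⟨(pvLevels hs).head?, (PySem.List.count (pvTags hs) "H1" : Int), pvSkipsOf (pvLevels hs),
   pvEmptiesOf hs, (pvLevels hs).getLast?, (pvFS (pvLevels hs)).1, (pvFS (pvLevels hs)).2⟩

-- A's level-collecting loop is filterMap pvLvl?
lemma foldl_levels (l : List String) (acc : List Int) :
    l.foldl (fun acc tag => match pvLvl? tag with | some n => acc ++ [n] | none => acc) acc
      = acc ++ l.filterMap pvLvl? := by
  induction l generalizing acc with
  | nil => simp
  | cons a t ih =>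
    cases hl : pvLvl? a <;> simp [List.foldl_cons, hl, ih]

lemma pvLevels_concat (hs : List (String × String)) (h : String × String) :
    pvLevels (hs ++ [h]) = pvLevels hs ++ (pvLvl? (PySem.Str.upper h.1)).toList := by
  cases hl : pvLvl? (PySem.Str.upper h.1) <;>
    simp [pvLevels, List.filterMap_append, hl]

lemma pairs_concat (L : List Int) (x : Int) :
    (L ++ [x]).zip ((L ++ [x]).drop 1)
      = L.zip (L.drop 1) ++ (match L.getLast? with | some p => [(p, x)] | none => []) := by
  induction L with
  | nil => simp
  | cons a t ih =>
    cases t with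
    | nil => simp
    | cons b t' =>
      simpa using ih

lemma pvEmpties_concat (hs : List (String × String)) (h : String × String) :
    pvEmptiesOf (hs ++ [h])
      = if PySem.Str.strip h.2 == "" then
          PySem.Set.add (pvEmptiesOf hs) ("<" ++ PySem.Str.upper h.1 ++ ">")
        else pvEmptiesOf hs := by
  unfold pvEmptiesOf pvTags
  rw [List.map_append, List.map_append, List.zip_append (by simp), List.foldl_append]
  simp

lemma pvCount_concat (hs : List (String × String)) (h : String × String) :
    List.count "H1" (pvTags (hs ++ [h]))
      = List.count "H1" (pvTags hs)
        + (if PySem.Str.upper h.1 == "H1" then 1 else 0) := by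
  unfold pvTags
  rw [List.map_append]
  simp [List.count_append, List.count_singleton]

lemma pvFS_concat (L : List Int) (l : Int) :
    pvFS (L ++ [l]) = ((pvFS L).1.setdefault l (pvFS L).2, (pvFS L).2 + 1) := by
  unfold pvFS
  rw [List.foldl_append]
  simp [List.foldl]

lemma pvSkips_concat (L : List Int) (l : Int) :
    pvSkipsOf (L ++ [l])
      = match L.getLast? with
        | some p => if l - p > 1 then PySem.Set.add (pvSkipsOf L) (msg_pair p l) else pvSkipsOf L
        | none => pvSkipsOf L := by
  unfold pvSkipsOf
  rw [pairs_concat, List.foldl_append]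
  cases L.getLast? <;> simp

-- the single-pass state after the loop equals A's separately computed quantities
lemma state_concat (hs : List (String × String)) (h : String × String) :
    pvStep (pvStA hs) h = pvStA (hs ++ [h]) := by
  have hh1 : pvLvl? "H1" = some 1 := by decide
  cases hl : pvLvl? (PySem.Str.upper h.1) with
  | none =>
    have htag : (PySem.Str.upper h.1 == "H1") = false := by
      by_contra hc
      have : PySem.Str.upper h.1 = "H1" := by
        simpa using (Bool.not_eq_false _).mp hc
      rw [this, hh1] at hl
      simp at hl
    unfold pvStep pvStA
    by_cases hstrip : (PySem.Str.strip h.2 == "") = true <;>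
      simp [hl, hstrip, pvLevels_concat, pvEmpties_concat, pvCount_concat, htag]
  | some l =>
    unfold pvStep pvStA
    by_cases hstrip : (PySem.Str.strip h.2 == "") = true <;>
      by_cases htag : (PySem.Str.upper h.1 == "H1") = true <;>
        cases hgl : (pvLevels hs).getLast? <;>
          cases hhd : (pvLevels hs).head? <;>
            simp [hl, hstrip, htag, hgl, hhd, pvLevels_concat, pvEmpties_concat, pvCount_concat,
              pvFS_concat, pvSkips_concat, Nat.cast_add, Nat.cast_one]

lemma state_eq (hs : List (String × String)) :
    hs.foldl pvStep pvInit = pvStA hs := by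
  induction hs using List.reverseRecOn with
  | nil => rfl
  | append_singleton hs h ih =>
    rw [List.foldl_append, ih]
    simp only [List.foldl_cons, List.foldl_nil]
    exact state_concat hs h

-- conditional one-element chunks of the tips list
def optIf (c : Prop) [Decidable c] (m : String) : List String := if c then [m] else []

def pvPC (s : PVSt) (lvl : Int) : Bool :=
  PySem.Dict.contains s.firstSeen lvl && PySem.Dict.contains s.firstSeen (lvl - 1)
    && decide (PySem.Dict.getD s.firstSeen lvl 0 < PySem.Dict.getD s.firstSeen (lvl - 1) 0)

def pvChunks (s : PVSt) : List String :=
  (match s.firstLevel with | none => [msg_nohead] | some f => optIf (f ≠ 1) msg_first)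
  ++ optIf (s.h1 > 1) (msg_h1 s.h1)
  ++ optIf (s.skips ≠ []) (msg_skips (PySem.Str.join ", " (PySem.List.sorted s.skips (fun x => x) false)))
  ++ optIf (s.empties ≠ []) (msg_empty (PySem.Str.join ", " (PySem.List.sorted s.empties (fun x => x) false)))
  ++ optIf (pvPC s 2 = true) (msg_parent 2) ++ optIf (pvPC s 3 = true) (msg_parent 3)
  ++ optIf (pvPC s 4 = true) (msg_parent 4) ++ optIf (pvPC s 5 = true) (msg_parent 5)
  ++ optIf (pvPC s 6 = true) (msg_parent 6)

lemma addTip_if (st : List String × PySem.Set String) (p : Prop) [Decidable p] (m : String) :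
    (if p then pvAddTip st m else st) = List.foldl pvAddTip st (optIf p m) := by
  by_cases hp : p <;> simp [optIf, hp]

lemma addTip_nested (st : List String × PySem.Set String) (a b : Bool) (x y : Int) (m : String) :
    (if a && b then List.foldl pvAddTip st (optIf (x < y) m) else st)
      = List.foldl pvAddTip st (optIf ((a && b && decide (x < y)) = true) m) := by
  cases a <;> cases b <;> by_cases hxy : x < y <;> simp [optIf, hxy]

lemma append_if (t : List String) (p : Prop) [Decidable p] (m : String) :
    (if p then t ++ [m] else t) = t ++ optIf p m := by
  by_cases hp : p <;> simp [optIf, hp]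

-- A's output is the dedup run over the chunk list
lemma addTip_single (st : List String × PySem.Set String) (m : String) :
    pvAddTip st m = List.foldl pvAddTip st [m] := rfl

lemma A_eq (headers : List (String × String)) :
    check_header_order headers
      = (List.foldl pvAddTip ([], PySem.Set.empty) (pvChunks (pvStA headers))).1 := by
  simp only [check_header_order, pvChunks, pvStA, pvSkipsOf, pvEmptiesOf, pvFS, pvTags, pvPC]
  rw [foldl_levels]
  simp only [List.nil_append]
  simp only [show (headers.map (fun p => PySem.Str.upper p.1)).filterMap pvLvl?
    = pvLevels headers from rfl]
  rw [show PySem.List.pyRange 2 7 1 = [2, 3, 4, 5, 6] from by decide]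
  simp only [List.foldl_cons, List.foldl_nil]
  by_cases hnil : pvLevels headers = []
  · simp only [hnil, List.head?_nil]
    simp only [addTip_if]
    simp only [addTip_nested]
    simp only [addTip_single]
    simp only [← List.foldl_append]
    simp only [List.append_assoc]
    rfl
  · obtain ⟨l, L', hL⟩ := List.exists_cons_of_ne_nil hnil
    simp only [hL, List.head?_cons]
    simp only [addTip_if]
    simp only [addTip_nested]
    simp only [← List.foldl_append]
    simp only [List.append_assoc]
    rfl

-- B's output is the chunk list itself
lemma B_eq (headers : List (String × String)) :
    check_header_order_alt headers = pvChunks (pvStA headers) := by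
  unfold check_header_order_alt
  rw [state_eq]
  rw [show PySem.List.pyRange 2 7 1 = [2, 3, 4, 5, 6] from by decide]
  simp only [List.foldl_cons, List.foldl_nil]
  unfold pvChunks pvPC
  cases (pvStA headers).firstLevel <;>
    · simp only [append_if]
      simp only [List.nil_append, List.append_assoc]

-- 12-character discriminating keys of the messages
def pvKey (s : String) : List Char := s.toList.take 12

lemma pvKey_h1 (n : Int) : pvKey (msg_h1 n) = "[COULD] Idea".toList := by
  unfold pvKey msg_h1
  rw [String.toList_append, String.toList_append, List.append_assoc,
    List.take_append_of_le_length (by decide)]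
  decide

lemma pvKey_skips (s : String) : pvKey (msg_skips s) = "[SHOULD] Do ".toList := by
  unfold pvKey msg_skips
  rw [String.toList_append, String.toList_append, List.append_assoc,
    List.take_append_of_le_length (by decide)]
  decide

lemma pvKey_empty (s : String) : pvKey (msg_empty s) = "[MUST] Avoid".toList := by
  unfold pvKey msg_empty
  rw [String.toList_append, String.toList_append, List.append_assoc,
    List.take_append_of_le_length (by decide)]
  decide

-- concatenation of conditional chunks is pairwise-distinct when the keys are
lemma run_addTips (l : List String) (t : List String)
    (hp : l.Pairwise (fun a b => a ≠ b)) (ht : ∀ m ∈ l, m ∉ t) :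
    List.foldl pvAddTip (t, PySem.Set.ofList t) l = (t ++ l, PySem.Set.ofList (t ++ l)) := by
  induction l generalizing t with
  | nil => simp
  | cons m rest ih =>
    have hmem : m ∉ t := ht m (List.mem_cons_self ..)
    have hstep : pvAddTip (t, PySem.Set.ofList t) m = (t ++ [m], PySem.Set.ofList (t ++ [m])) := by
      have hc : PySem.Set.contains (PySem.Set.ofList t) m = false := by
        rw [← Bool.not_eq_true]
        simp only [PySem.Set.contains_iff, PySem.Set.mem_ofList]
        exact hmem
      have hadd : (PySem.Set.ofList t).add m = PySem.Set.ofList (t ++ [m]) := by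
        conv_rhs => rw [PySem.Set.ofList_eq_foldl, List.foldl_append]
        simp [← PySem.Set.ofList_eq_foldl]
      simp only [pvAddTip, hc, Bool.false_eq_true, if_false, hadd]
    rw [List.foldl_cons, hstep]
    rw [ih (t ++ [m]) hp.of_cons ?_]
    · simp
    · intro m' hm'
      simp only [List.mem_append, List.mem_singleton]
      rintro (h1 | h2)
      · exact ht m' (List.mem_cons_of_mem _ hm') h1
      · exact (List.rel_of_pairwise_cons hp hm') h2.symm

lemma pvKey_ne {a b : String} (h : pvKey a ≠ pvKey b) : a ≠ b := fun he => h (by rw [he])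

lemma pairwise_of_keys (l : List String) (h : (l.map pvKey).Pairwise (fun a b => a ≠ b)) :
    l.Pairwise (fun a b => a ≠ b) := by
  rw [List.pairwise_map] at h
  exact h.imp pvKey_ne

lemma optIf_sublist (c : Prop) [Decidable c] (m : String) : (optIf c m).Sublist [m] := by
  by_cases hc : c <;> simp [optIf, hc]

lemma pairwise_chunks (s : PVSt) : (pvChunks s).Pairwise (fun a b => a ≠ b) := by
  have htail : ∀ m1 : String, pvKey m1 ∈ ["[MUST] At le".toList, "[SHOULD] The".toList] →
      ([m1] ++ [msg_h1 s.h1]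
        ++ [msg_skips (PySem.Str.join ", " (PySem.List.sorted s.skips (fun x => x) false))]
        ++ [msg_empty (PySem.Str.join ", " (PySem.List.sorted s.empties (fun x => x) false))]
        ++ [msg_parent 2] ++ [msg_parent 3] ++ [msg_parent 4] ++ [msg_parent 5]
        ++ [msg_parent 6]).Pairwise (fun a b => a ≠ b) := by
    intro m1 hm1
    apply pairwise_of_keys
    simp only [List.map_append, List.map_cons, List.map_nil, pvKey_h1, pvKey_skips, pvKey_empty]
    rcases List.mem_pair.mp hm1 with hk | hk <;>
      rw [hk] <;>
      rw [show pvKey (msg_parent 2) = "[COULD] <h2>".toList from by decide,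
        show pvKey (msg_parent 3) = "[COULD] <h3>".toList from by decide,
        show pvKey (msg_parent 4) = "[COULD] <h4>".toList from by decide,
        show pvKey (msg_parent 5) = "[COULD] <h5>".toList from by decide,
        show pvKey (msg_parent 6) = "[COULD] <h6>".toList from by decide] <;>
      decide
  unfold pvChunks
  cases s.firstLevel with
  | none =>
    refine List.Pairwise.sublist ?_ (htail msg_nohead (by decide))
    exact ((((((((List.Sublist.refl _).append (optIf_sublist _ _)).append
      (optIf_sublist _ _)).append (optIf_sublist _ _)).append
      (optIf_sublist _ _)).append (optIf_sublist _ _)).append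
      (optIf_sublist _ _)).append (optIf_sublist _ _)).append (optIf_sublist _ _)
  | some f =>
    refine List.Pairwise.sublist ?_ (htail msg_first (by decide))
    exact ((((((((optIf_sublist _ _).append (optIf_sublist _ _)).append
      (optIf_sublist _ _)).append (optIf_sublist _ _)).append
      (optIf_sublist _ _)).append (optIf_sublist _ _)).append
      (optIf_sublist _ _)).append (optIf_sublist _ _)).append (optIf_sublist _ _)

-- ===== VERDICT (by name: the statement is the Claim_ definition above) =====
theorem check_header_order_spec : Claim_equal_check_header_order := by
  intro headers _
  unfold Spec_check_header_order
  rw [A_eq headers, B_eq headers]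
  have h0 : (([], PySem.Set.empty) : List String × PySem.Set String)
      = (([] : List String), PySem.Set.ofList []) := rfl
  rw [h0, run_addTips _ _ (pairwise_chunks _) (by simp)]
  simp
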